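-- pv_equiv track=rewrite | github.com/shwotherspoon/speech-synthesis | text_select.py | select_utts
-- ===== SOURCE A (Python) =====
-- def rank_utts(diphones, wishlist):
-- 	'''
-- 	Given a dictionary of utts and their diphone sequences and a
-- 	wishlist of diphones, return a list of utts and scores ranked
-- 	by diphone coverage, from greatest to least.
-- 	'''
-- 	utt_scores = {}
-- 	for utt, seq in diphones.items():
-- 		score = 0
-- 		for diph in set(seq):
-- 			if diph in wishlist:
-- 				score += 1
-- 		utt_scores[utt] = score
--
-- 	scored_utts = list(utt_scores.items())
-- 	ranked_utts = sorted(scored_utts, key=lambda x: x[1], reverse=True)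
-- 	return ranked_utts
--
-- def select_utts(wishlist, utts_dict, len_limit):
-- 	'''
-- 	Given a dictionary of utts and their diphone sequences, a wishlist
-- 	of diphones, and a length limit for the number of selected utts,
-- 	create a list of the best ranked utts, updating the wishlist and
-- 	rescoring after each new utt is added.
-- 	'''
-- 	init_wishlist = set([x for x in wishlist])
-- 	selected_utts = []
-- 	while len(selected_utts) < len_limit:
-- 		if len(wishlist) == 0:
-- 			wishlist = set([x for x in init_wishlist])
-- 		# rank utts
-- 		ranked_utts = rank_utts(utts_dict, wishlist)
--
-- 		# pick best utt and add to list
-- 		best = ranked_utts[0][0]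
-- 		selected_utts.append(best)
--
-- 		# update wishlist
-- 		for diph in utts_dict[best]:
-- 			try:
-- 				wishlist.remove(diph)
-- 			except:
-- 				pass
--
-- 		# pop selected utt from utts dict
-- 		del utts_dict[best]
--
-- 	return selected_utts
-- ===== SOURCE B (Python) =====
-- def select_utts(wishlist, utts_dict, len_limit):
--     # Inverted-index greedy: scores are maintained INCREMENTALLY instead of
--     # recomputed from the diphone sequences each round.  We precompute, once,
--     # an inverted index diphone -> utts containing it and each utt's base
--     # score; per round we take the first maximum of the stored scores and,
--     # when a wishlist diphone's multiplicity drops to zero, decrement the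
--     # scores of exactly the utts containing it (restoring base scores on a
--     # wishlist refill).  Unlike A, this does not mutate its arguments.
--     order = [u for u in utts_dict]
--     seqs = {u: utts_dict[u] for u in order}
--     dist = {u: set(seqs[u]) for u in order}
--     counts = {}
--     for d in wishlist:
--         counts[d] = counts.get(d, 0) + 1
--     total = len(wishlist)
--     present0 = [d for d in counts]          # distinct diphones, first-occurrence order
--     inv = {}
--     for u in order:
--         for d in dist[u]:
--             if d in counts:
--                 inv.setdefault(d, []).append(u)
--     base = {u: sum(1 for d in dist[u] if d in counts) for u in order}
--     score = dict(base)
--     remaining = list(order)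
--     selected = []
--     picked = 0
--     while picked < len_limit:
--         if total == 0:
--             counts = {d: 1 for d in present0}
--             total = len(present0)
--             score = {u: base[u] for u in remaining}
--         best_i = -1
--         best_s = -1
--         for i, u in enumerate(remaining):
--             s = score[u]
--             if s > best_s:
--                 best_i, best_s = i, s
--         if best_i < 0:
--             break                           # no utts left (A raises IndexError here)
--         u = remaining.pop(best_i)
--         del score[u]
--         selected.append(u)
--         for d in seqs[u]:
--             c = counts.get(d, 0)
--             if c:
--                 counts[d] = c - 1
--                 total -= 1
--                 if c == 1:                  # d left the wishlist: downdate its utts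
--                     for v in inv[d]:
--                         if v in score:
--                             score[v] -= 1
--         picked += 1
--     return selected
-- ===== Notes on version B (the rewrite author's own statement) =====
-- stated objective: faster
-- what changed: B replaces A's per-round full re-ranking (recompute every utt's score from set(seq) against the wishlist, then sort all utts just to take the top one) by a one-time inverted diphone->utts index with incrementally maintained scores: per round a single first-argmax scan of stored scores, and score updates only for the utts containing a diphone whose wishlist count just hit zero.
import Mathlib
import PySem

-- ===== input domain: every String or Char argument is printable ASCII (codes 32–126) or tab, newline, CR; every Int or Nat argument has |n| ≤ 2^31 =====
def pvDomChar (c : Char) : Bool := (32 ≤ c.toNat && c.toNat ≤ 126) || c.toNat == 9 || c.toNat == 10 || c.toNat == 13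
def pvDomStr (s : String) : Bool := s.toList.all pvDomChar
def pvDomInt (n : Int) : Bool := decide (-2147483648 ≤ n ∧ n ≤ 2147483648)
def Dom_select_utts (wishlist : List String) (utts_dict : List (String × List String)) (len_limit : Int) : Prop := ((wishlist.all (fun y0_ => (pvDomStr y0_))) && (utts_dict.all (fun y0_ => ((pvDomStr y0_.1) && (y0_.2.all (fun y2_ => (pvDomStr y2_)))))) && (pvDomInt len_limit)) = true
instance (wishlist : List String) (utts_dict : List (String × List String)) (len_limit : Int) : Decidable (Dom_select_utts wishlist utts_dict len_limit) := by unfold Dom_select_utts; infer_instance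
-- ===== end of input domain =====

-- B replaces A's per-round rescoring of every utterance from its diphone sequence (plus a full
-- sort per round) by a precomputed inverted diphone→utts index with incrementally maintained
-- scores; return values agree on Pre_.
-- NOTE: the Python A mutates wishlist and utts_dict in place (list/set.remove, del); B does not.
-- The equivalence proved here is about the RETURN value only.

-- ===== PORT A =====
-- score = 0; for diph in set(seq): if diph in wishlist: score += 1   (order-independent sum over the set)
def pvScoreA (wishlist : List String) (seq : List String) : Int :=
  (PySem.Set.ofList seq).foldl (fun score diph => if diph ∈ wishlist then score + 1 else score) 0

def rank_utts (diphones : PySem.Dict String (List String)) (wishlist : List String) : List (String × Int) :=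
  let utt_scores := diphones.items.foldl
    (fun d p => d.insert p.1 (pvScoreA wishlist p.2)) PySem.Dict.empty
  PySem.List.sorted utt_scores.items (fun x => x.2) true

-- A's while loop: one fuel unit per appended utt (selected grows by exactly 1 each pass)
def pvLoopA (init_wishlist : List String) :
    Nat → List String → PySem.Dict String (List String) → List String → List String
  | 0, _, _, selected => selected
  | fuel+1, wishlist, utts, selected =>
    let wishlist := if wishlist.length = 0 then init_wishlist else wishlist
    match rank_utts utts wishlist with
    | [] => selected  -- Python: IndexError on ranked_utts[0]; excluded by Pre_
    | (best, _) :: _ =>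
      let wishlist := (utts.getD best []).foldl
        (fun wl diph => (PySem.List.remove? wl diph).getD wl) wishlist   -- try: remove except: pass
      pvLoopA init_wishlist fuel wishlist (utts.erase best) (selected ++ [best])

def select_utts (wishlist : List String) (utts_dict : List (String × List String)) (len_limit : Int) : List String :=
  -- init_wishlist = set(wishlist); A's wishlist variable is a list, after a refill a set:
  -- both are modelled as a List String (a set = its distinct elements), membership/len/remove agree.
  pvLoopA (PySem.Set.ofList wishlist) len_limit.toNat wishlist (PySem.Dict.mk utts_dict) []

-- ===== PORT B =====
-- base[u] = sum(1 for d in dist[u] if d in counts)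
def pvSumIn (counts : PySem.Dict String Int) (distu : List String) : Int :=
  distu.foldl (fun s d => if counts.contains d then s + 1 else s) 0

-- for v in inv[d]: if v in score: score[v] -= 1
def pvDecInv (score : PySem.Dict String Int) (vs : List String) : PySem.Dict String Int :=
  vs.foldl (fun sc v => if sc.contains v then sc.insert v (sc.getD v 0 - 1) else sc) score

-- one diphone of the picked utt's sequence; state = (counts, total, score)
def pvUpd (inv : PySem.Dict String (List String))
    (st : PySem.Dict String Int × Int × PySem.Dict String Int) (d : String) :
    PySem.Dict String Int × Int × PySem.Dict String Int :=
  let c := st.1.getD d 0                        -- c = counts.get(d, 0)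
  if c ≠ 0 then                                 -- if c:
    (st.1.insert d (c - 1), st.2.1 - 1,
      if c = 1 then pvDecInv st.2.2 (inv.getD d []) else st.2.2)
  else st

-- single-pass first-argmax over enumerate(remaining); score[u]: KeyError unreachable
-- (remaining ⊆ score's keys throughout), modelled as getD u 0
def pvArgmax (score : PySem.Dict String Int) (remaining : List String) : Int × Int :=
  (PySem.List.enumerate remaining 0).foldl
    (fun acc p =>
      let s := score.getD p.2 0
      if s > acc.2 then (p.1, s) else acc) (-1, -1)

def pvLoopB (seqs : PySem.Dict String (List String)) (inv : PySem.Dict String (List String))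
    (base : PySem.Dict String Int) (present0 : List String) :
    Nat → PySem.Dict String Int → Int → PySem.Dict String Int → List String → List String → List String
  | 0, _, _, _, _, selected => selected
  | fuel+1, counts0, total0, score0, remaining, selected =>
    -- if total == 0: refill counts, total, score
    let counts := if total0 = 0 then present0.foldl (fun d x => d.insert x 1) PySem.Dict.empty else counts0
    let total := if total0 = 0 then (present0.length : Int) else total0
    let score := if total0 = 0 then remaining.foldl (fun sc u => sc.insert u (base.getD u 0)) PySem.Dict.empty else score0
    let best := pvArgmax score remaining
    if best.1 < 0 then selected                 -- break: no utts left
    else match PySem.List.pop? remaining best.1 with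
      | none => selected                        -- unreachable: best.1 is a valid index
      | some (u, rest) =>
        -- del score[u] (key present by the invariant), then the per-diphone downdate
        let st := (seqs.getD u []).foldl (pvUpd inv) (counts, total, score.erase u)
        pvLoopB seqs inv base present0 fuel st.1 st.2.1 st.2.2 rest (selected ++ [u])

def select_utts_alt (wishlist : List String) (utts_dict : List (String × List String)) (len_limit : Int) : List String :=
  let order := utts_dict.map (fun p => p.1)
  let seqs := PySem.Dict.mk utts_dict          -- {u: utts_dict[u] for u in order}: the same pairs (keys distinct under Pre_)
  let dist := PySem.Dict.mk (order.map (fun u => (u, PySem.Set.ofList (seqs.getD u []))))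
  let counts := wishlist.foldl (fun d x => d.insert x (d.getD x 0 + 1)) PySem.Dict.empty
  let total := (wishlist.length : Int)
  let present0 := counts.keys                  -- [d for d in counts]
  -- for u in order: for d in dist[u]: if d in counts: inv.setdefault(d, []).append(u)
  let inv := order.foldl
    (fun iv u => (dist.getD u []).foldl
      (fun iv d => if counts.contains d then iv.modify d [] (fun l => l ++ [u]) else iv) iv)
    PySem.Dict.empty
  let base := order.foldl (fun b u => b.insert u (pvSumIn counts (dist.getD u []))) PySem.Dict.empty
  -- score = dict(base); remaining = list(order): copies, identical values
  pvLoopB seqs inv base present0 len_limit.toNat counts total base order []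

-- ===== PRECONDITION & SPEC =====
-- utts_dict is a Python dict, so its keys are distinct (a duplicate-key association list does not
-- represent any input A accepts); len_limit ≤ |utts_dict| excluded because A raises IndexError
-- (ranked_utts[0] on an exhausted dict) as soon as the dict runs out of utts.
def Pre_select_utts (wishlist : List String) (utts_dict : List (String × List String)) (len_limit : Int) : Prop :=
  (utts_dict.map (fun p => p.1)).Nodup ∧ len_limit ≤ (utts_dict.length : Int)
instance (wishlist : List String) (utts_dict : List (String × List String)) (len_limit : Int) : Decidable (Pre_select_utts wishlist utts_dict len_limit) := by unfold Pre_select_utts; infer_instance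

def pvWitness_select_utts : List String × (List (String × List String)) × Int :=
  (["ab", "bc"], [("u1", ["ab", "ab"]), ("u2", ["bc", "ab"])], 2)

def Spec_select_utts (wishlist : List String) (utts_dict : List (String × List String)) (len_limit : Int) (out : List String) : Prop := out = select_utts_alt wishlist utts_dict len_limit
instance (wishlist : List String) (utts_dict : List (String × List String)) (len_limit : Int) (out : List String) : Decidable (Spec_select_utts wishlist utts_dict len_limit out) := by unfold Spec_select_utts; infer_instance

-- ===== CLAIM (what is proved, stated in full; the proofs are below) =====
def Claim_equal_select_utts : Prop := ∀ (wishlist : List String) (utts_dict : List (String × List String)) (len_limit : Int), Dom_select_utts wishlist utts_dict len_limit → Pre_select_utts wishlist utts_dict len_limit → Spec_select_utts wishlist utts_dict len_limit (select_utts wishlist utts_dict len_limit)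

-- ===== LEMMAS AND PROOFS =====

-- ---- generic first-argmax machinery ----
-- left-to-right running first-argmax carrying (index, element)
def pvGo {α : Type} (f : α → Int) : List α → Int → (Int × α) → (Int × α)
  | [], _, best => best
  | x :: t, i, best => pvGo f t (i+1) (if f best.2 < f x then (i, x) else best)

lemma pvGo_spec {α : Type} (f : α → Int) :
    ∀ (t : List α) (i : Int) (b : Int × α),
      pvGo f t i b = b ∨ ∃ j : Nat, ∃ hj : j < t.length, pvGo f t i b = (i + j, t[j]) := by
  intro t
  induction t with
  | nil => intro i b; left; rfl
  | cons x t ih =>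
    intro i b
    simp only [pvGo]
    by_cases h : f b.2 < f x
    · simp only [if_pos h]
      rcases ih (i+1) (i, x) with h1 | ⟨j, hj, h2⟩
      · right
        refine ⟨0, by simp, ?_⟩
        simpa using h1
      · right
        refine ⟨j+1, by simpa using Nat.succ_lt_succ hj, ?_⟩
        rw [h2]
        simp only [Prod.mk.injEq, List.getElem_cons_succ]
        exact ⟨by push_cast; ring, trivial⟩
    · simp only [if_neg h]
      rcases ih (i+1) b with h1 | ⟨j, hj, h2⟩
      · left; exact h1
      · right
        refine ⟨j+1, by simpa using Nat.succ_lt_succ hj, ?_⟩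
        rw [h2]
        simp only [Prod.mk.injEq, List.getElem_cons_succ]
        exact ⟨by push_cast; ring, trivial⟩

-- B's enumerate fold computes pvGo (projected to (index, score))
lemma pvBest_go {α : Type} (f : α → Int) :
    ∀ (t : List α) (i : Int) (b : Int × α),
      (PySem.List.enumerate t i).foldl
        (fun acc q => if f q.2 > acc.2 then (q.1, f q.2) else acc) (b.1, f b.2)
      = ((pvGo f t i b).1, f (pvGo f t i b).2) := by
  intro t
  induction t with
  | nil => intro i b; simp [PySem.List.enumerate_nil, pvGo]
  | cons x t ih =>
    intro i b
    rw [PySem.List.enumerate_cons, List.foldl_cons]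
    simp only [pvGo]
    by_cases h : f b.2 < f x
    · rw [if_pos h, if_pos h]
      exact ih (i+1) (i, x)
    · rw [if_neg h, if_neg h]
      exact ih (i+1) b

lemma enumerate_map {α β : Type} (h : α → β) :
    ∀ (l : List α) (i : Int),
      PySem.List.enumerate (l.map h) i = (PySem.List.enumerate l i).map (fun q => (q.1, h q.2)) := by
  intro l
  induction l with
  | nil => intro i; simp [PySem.List.enumerate_nil]
  | cons x t ih => intro i; simp [PySem.List.enumerate_cons, ih]

-- head of a Python reverse-sorted list is the FIRST key-maximal element (= max?)
lemma head?_sorted_rev {α κ : Type} [LinearOrder κ] (l : List α) (key : α → κ) :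
    (PySem.List.sorted l key true).head? = PySem.List.max? l key := by
  rw [PySem.List.sorted_rev_eq_foldl_insertBy]
  have main : ∀ (L : List α) (acc : List α),
      (L.foldl (fun acc x => PySem.List.insertBy (fun a b => decide (key b < key a)) x acc) acc).head?
      = L.foldl (fun acc x => match acc with
          | none => some x
          | some m => if key m < key x then some x else some m) acc.head? := by
    intro L
    induction L with
    | nil => intro acc; rfl
    | cons x t ih =>
      intro acc
      rw [List.foldl_cons, List.foldl_cons, ih]
      congr 1
      cases acc with
      | nil => rfl
      | cons y ys => by_cases h : key y < key x <;> simp [PySem.List.insertBy, h]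
  simpa [PySem.List.max?] using main l []

lemma max?_cons_foldl {α κ : Type} [LinearOrder κ] (key : α → κ) (x : α) (t : List α) :
    PySem.List.max? (x :: t) key = some (t.foldl (fun m y => if key m < key y then y else m) x) := by
  have aux : ∀ (t : List α) (z : α),
      t.foldl (fun acc x => match acc with
          | none => some x
          | some m => if key m < key x then some x else some m) (some z)
      = some (t.foldl (fun m y => if key m < key y then y else m) z) := by
    intro t
    induction t with
    | nil => intro z; rfl
    | cons y ys ih =>
      intro z
      rw [List.foldl_cons, List.foldl_cons]
      by_cases h : key z < key y <;> simp only [h, if_pos, if_neg, ite_true, ite_false] <;> exact ih _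
  simp only [PySem.List.max?, List.foldl_cons]
  exact aux t x

-- the max?-fold over the mapped (name, score) list is the g-image of the pvGo element
lemma max?_fold_go {α β : Type} (f : α → Int) (g : α → β) (sc : β → Int)
    (hg : ∀ a, sc (g a) = f a) :
    ∀ (t : List α) (i : Int) (k : Int) (b : α),
      (t.map g).foldl (fun m y => if sc m < sc y then y else m) (g b)
        = g ((pvGo f t i (k, b)).2) := by
  intro t
  induction t with
  | nil => intro i k b; simp [pvGo]
  | cons x s ih =>
    intro i k b
    rw [List.map_cons, List.foldl_cons]
    simp only [pvGo, hg]
    by_cases h : f b < f x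
    · rw [if_pos h, if_pos h]
      exact ih (i+1) i x
    · rw [if_neg h, if_neg h]
      exact ih (i+1) k b

-- ---- small dict lemmas (erase = filter on items) ----
lemma find?_filter_ne {ν : Type} (l : List (String × ν)) (k y : String) (h : y ≠ k) :
    (l.filter (fun p => !(p.1 == k))).find? (fun p => p.1 == y) = l.find? (fun p => p.1 == y) := by
  induction l with
  | nil => rfl
  | cons p t ih =>
    by_cases hp : p.1 = k
    · have hky : (k == y) = false := beq_eq_false_iff_ne.mpr (Ne.symm h)
      simp [List.filter_cons, hp, List.find?_cons, hky, ih]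
    · have hkeep : (!(p.1 == k)) = true := by simp [hp]
      by_cases hpy : (p.1 == y) = true
      · simp [List.filter_cons, hkeep, List.find?_cons, hpy]
      · simp only [Bool.not_eq_true] at hpy
        simp [List.filter_cons, hkeep, List.find?_cons, hpy, ih]

lemma find?_filter_self {ν : Type} (l : List (String × ν)) (k : String) :
    (l.filter (fun p => !(p.1 == k))).find? (fun p => p.1 == k) = none := by
  induction l with
  | nil => rfl
  | cons p t ih =>
    by_cases hp : p.1 = k
    · simp [List.filter_cons, hp, ih]
    · simp [List.filter_cons, List.find?_cons, hp, ih]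

lemma dict_get?_erase {ν : Type} (d : PySem.Dict String ν) (k y : String) :
    (d.erase k).get? y = if y = k then none else d.get? y := by
  by_cases h : y = k
  · subst h
    simp [PySem.Dict.erase, PySem.Dict.get?, find?_filter_self]
  · simp [PySem.Dict.erase, PySem.Dict.get?, find?_filter_ne d.items k y h, h]

-- erasing the key of the k-th item from a nodup-key item list is eraseIdx k
lemma filter_ne_eq_eraseIdx {ν : Type} :
    ∀ (l : List (String × ν)) (k : Nat) (hk : k < l.length),
      (l.map (fun p => p.1)).Nodup →
      l.filter (fun p => !(p.1 == l[k].1)) = l.eraseIdx k := by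
  intro l
  induction l with
  | nil => intro k hk; simp at hk
  | cons p t ih =>
    intro k hk hnd
    rw [List.map_cons, List.nodup_cons] at hnd
    cases k with
    | zero =>
      rw [List.eraseIdx_cons_zero, List.getElem_cons_zero, List.filter_cons,
        if_neg (by simp : ¬((!(p.1 == p.1)) = true))]
      refine List.filter_eq_self.mpr ?_
      intro q hq
      have : q.1 ≠ p.1 := fun he => hnd.1 (he ▸ List.mem_map_of_mem hq)
      simp [this]
    | succ k =>
      have hk' : k < t.length := by simpa using hk
      have hne : p.1 ≠ t[k].1 := by
        intro he
        exact hnd.1 (he ▸ List.mem_map_of_mem (List.getElem_mem hk'))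
      simp only [List.eraseIdx_cons_succ, List.filter_cons, List.getElem_cons_succ]
      rw [ih k hk' hnd.2]
      simp [hne]

lemma remove?_getD_eq_erase (wl : List String) (d : String) :
    (PySem.List.remove? wl d).getD wl = wl.erase d := by
  induction wl with
  | nil => rfl
  | cons x t ih =>
    by_cases hx : x = d
    · simp [PySem.List.remove?, List.idxOf?_cons, hx, List.erase_cons]
    · have hb : (x == d) = false := by simp [hx]
      cases hio : List.idxOf? d t with
      | none =>
        have hnm : d ∉ t := by simpa [List.idxOf?_eq_none_iff] using hio
        simp [PySem.List.remove?, List.idxOf?_cons, hb, hio, List.erase_cons,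
          List.erase_of_not_mem hnm]
      | some j =>
        have ht : t.eraseIdx j = t.erase d := by
          simpa [PySem.List.remove?, hio] using ih
        simp [PySem.List.remove?, List.idxOf?_cons, hb, hio, List.erase_cons,
          List.eraseIdx_cons_succ, ht]

-- ---- generic fold-insert lookup ----
lemma get?_foldl_insert {ν : Type} (f : String → ν) :
    ∀ (l : List String) (d0 : PySem.Dict String ν) (y : String),
      (l.foldl (fun dd k => dd.insert k (f k)) d0).get? y
        = if y ∈ l then some (f y) else d0.get? y := by
  intro l
  induction l with
  | nil => intro d0 y; simp
  | cons x t ih =>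
    intro d0 y
    rw [List.foldl_cons, ih]
    by_cases hyt : y ∈ t
    · simp [hyt]
    · by_cases hyx : y = x
      · subst hyx
        simp [hyt, PySem.Dict.get?_insert_self]
      · simp [hyt, hyx, PySem.Dict.get?_insert_of_ne d0 (f x) hyx]

-- ---- pvScoreA as a countP ----
lemma scoreA_eq_countP (wl s : List String) :
    pvScoreA wl s = ((PySem.Set.ofList s).countP (fun e => decide (e ∈ wl)) : Int) := by
  unfold pvScoreA
  have := PySem.List.foldl_count_if (fun e => decide (e ∈ wl)) (PySem.Set.ofList s) 0
  simpa using this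

lemma scoreA_nonneg (wl s : List String) : 0 ≤ pvScoreA wl s := by
  rw [scoreA_eq_countP]; positivity

-- scoreA only depends on membership in the wishlist
lemma scoreA_ext (wl1 wl2 s : List String) (h : ∀ e, e ∈ wl1 ↔ e ∈ wl2) :
    pvScoreA wl1 s = pvScoreA wl2 s := by
  unfold pvScoreA
  apply PySem.List.foldl_congr_mem
  intro acc x _
  by_cases hx : x ∈ wl1
  · simp [hx, (h x).mp hx]
  · simp [hx, show x ∉ wl2 from fun h2 => hx ((h x).mpr h2)]

-- removing the last copy of d from the wishlist lowers the score by [d ∈ seq]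
lemma scoreA_erase (wl s : List String) (d : String) (hd : d ∈ wl) (hc : wl.count d = 1) :
    pvScoreA (wl.erase d) s = pvScoreA wl s - (if d ∈ s then 1 else 0) := by
  rw [scoreA_eq_countP, scoreA_eq_countP]
  have hnd : (PySem.Set.ofList s).Nodup := PySem.Set.nodup_ofList s
  have hdm : d ∈ PySem.Set.ofList s ↔ d ∈ s := PySem.Set.mem_ofList s d
  have hde : d ∉ wl.erase d := by
    intro hmem
    have := List.count_pos_iff.mpr hmem
    rw [List.count_erase_self, hc] at this
    omega
  have key : ∀ (L : List String), L.Nodup →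
      (L.countP (fun e => decide (e ∈ wl.erase d)) : Int)
        = (L.countP (fun e => decide (e ∈ wl)) : Int) - (if d ∈ L then 1 else 0) := by
    intro L hL
    induction L with
    | nil => simp
    | cons x t ih =>
      rw [List.nodup_cons] at hL
      by_cases hx : x = d
      · subst hx
        have hxt : x ∉ t := hL.1
        rw [List.countP_cons, List.countP_cons]
        simp [hde, hd, hxt, ih hL.2]
      · have hmx : x ∈ wl.erase d ↔ x ∈ wl := List.mem_erase_of_ne hx
        rw [List.countP_cons, List.countP_cons]
        have hdx : d ≠ x := fun hh => hx hh.symm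
        have hdm2 : d ∈ x :: t ↔ d ∈ t := by simp [hdx]
        by_cases hxw : x ∈ wl
        · simp only [hmx.mpr hxw, hxw, decide_true, if_pos]
          push_cast
          rw [ih hL.2]
          simp [hdm2]
          split_ifs <;> ring
        · have hxe : x ∉ wl.erase d := fun h2 => hxw (hmx.mp h2)
          simp only [hxe, hxw, decide_false]
          push_cast
          rw [ih hL.2]
          simp [hdm2]
      
  rw [key _ hnd]
  congr 1
  simp [hdm]

-- ---- pvDecInv pointwise effect ----
lemma decInv_get? :
    ∀ (vs : List String), vs.Nodup →
    ∀ (score : PySem.Dict String Int) (y : String),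
      (pvDecInv score vs).get? y
        = if y ∈ vs then (score.get? y).map (· - 1) else score.get? y := by
  intro vs
  induction vs with
  | nil => intro _ score y; simp [pvDecInv]
  | cons v t ih =>
    intro hnd score y
    rw [List.nodup_cons] at hnd
    show (pvDecInv (if score.contains v then score.insert v (score.getD v 0 - 1) else score) t).get? y = _
    rw [ih hnd.2]
    by_cases hcv : score.contains v = true
    · rw [if_pos hcv]
      obtain ⟨c, hc⟩ : ∃ c, score.get? v = some c := by
        rw [PySem.Dict.contains_eq_isSome_get?] at hcv
        exact Option.isSome_iff_exists.mp hcv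
      by_cases hyv : y = v
      · subst hyv
        have hyt : y ∉ t := hnd.1
        simp [hyt, PySem.Dict.get?_insert_self, hc, PySem.Dict.getD_eq_get?_getD]
      · rw [PySem.Dict.get?_insert_of_ne _ _ hyv]
        simp [List.mem_cons, hyv]
    · rw [if_neg hcv]
      by_cases hyv : y = v
      · subst hyv
        have hyt : y ∉ t := hnd.1
        have hnone : score.get? y = none := by
          rw [PySem.Dict.contains_eq_isSome_get?] at hcv
          simpa using hcv
        simp [hyt, hnone]
      · simp [List.mem_cons, hyv]

-- ---- the joint state invariant: B's (counts, total, score) describe A's wishlist and utts ----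
def pvSInv (wishlist : List String) (wl : List String)
    (items' : List (String × List String))
    (st : PySem.Dict String Int × Int × PySem.Dict String Int) : Prop :=
  (∀ d, st.1.getD d 0 = (wl.count d : Int)) ∧
  st.2.1 = (wl.length : Int) ∧
  (∀ d, d ∈ wl → d ∈ wishlist) ∧
  (∀ v, st.2.2.contains v = decide (v ∈ items'.map (fun p => p.1))) ∧
  (∀ v seq, (v, seq) ∈ items' → st.2.2.getD v 0 = pvScoreA wl seq)

-- the inverted index: inv[d] lists exactly the utts whose sequence contains d, without repeats
def pvInvIdx (utts_dict : List (String × List String))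
    (inv : PySem.Dict String (List String)) (wishlist : List String) : Prop :=
  ∀ d, d ∈ wishlist → (inv.getD d []).Nodup ∧
    ∀ v seq, (v, seq) ∈ utts_dict → (v ∈ inv.getD d [] ↔ d ∈ seq)

lemma pvUpd_step (wishlist : List String) (utts_dict : List (String × List String))
    (inv : PySem.Dict String (List String)) (Hinv : pvInvIdx utts_dict inv wishlist)
    (items' : List (String × List String)) (hsub : items'.Sublist utts_dict)
    (wl : List String) (st : PySem.Dict String Int × Int × PySem.Dict String Int) (d : String)
    (h : pvSInv wishlist wl items' st) :
    pvSInv wishlist (wl.erase d) items' (pvUpd inv st d) := by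
  obtain ⟨hC, hT, hW, hK, hS⟩ := h
  unfold pvUpd
  by_cases h0 : wl.count d = 0
  · have hc0 : st.1.getD d 0 = 0 := by rw [hC d, h0]; rfl
    rw [hc0, if_neg (by simp)]
    have hnm : d ∉ wl := by simpa using List.count_eq_zero.mp h0
    rw [List.erase_of_not_mem hnm]
    exact ⟨hC, hT, hW, hK, hS⟩
  · have hmem : d ∈ wl := List.count_pos_iff.mp (Nat.pos_of_ne_zero h0)
    have hc : st.1.getD d 0 = (wl.count d : Int) := hC d
    have hcne : st.1.getD d 0 ≠ 0 := by rw [hc]; exact_mod_cast h0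
    rw [if_pos hcne]
    refine ⟨?_, ?_, ?_, ?_, ?_⟩
    · intro e
      rw [PySem.Dict.getD_insert]
      by_cases he : e = d
      · subst he
        rw [if_pos rfl, hc, List.count_erase_self]
        have := Nat.pos_of_ne_zero h0
        push_cast [Nat.cast_sub (by omega : 1 ≤ wl.count e)]
        ring
      · rw [if_neg he, hC e, List.count_erase_of_ne he]
    · show st.2.1 - 1 = ((wl.erase d).length : Int)
      rw [hT, List.length_erase_of_mem hmem]
      have : 1 ≤ wl.length := List.length_pos_of_mem hmem
      push_cast [Nat.cast_sub this]
      ring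
    · intro e he
      exact hW e (List.mem_of_mem_erase he)
    · -- contains on the (possibly) downdated score
      intro v
      by_cases h1 : st.1.getD d 0 = 1
      · rw [if_pos h1]
        obtain ⟨hLnd, _⟩ := Hinv d (hW d hmem)
        rw [PySem.Dict.contains_eq_isSome_get?, decInv_get? _ hLnd]
        by_cases hv : v ∈ inv.getD d []
        · rw [if_pos hv, Option.isSome_map, ← PySem.Dict.contains_eq_isSome_get?, hK v]
        · rw [if_neg hv, ← PySem.Dict.contains_eq_isSome_get?, hK v]
      · rw [if_neg h1]; exact hK v
    · -- score values
      intro v seq hvs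
      have hcount1iff : st.1.getD d 0 = 1 ↔ wl.count d = 1 := by
        rw [hc]; exact_mod_cast Iff.rfl
      by_cases h1 : st.1.getD d 0 = 1
      · rw [if_pos h1]
        have hc1 : wl.count d = 1 := hcount1iff.mp h1
        obtain ⟨hLnd, hLmem⟩ := Hinv d (hW d hmem)
        have hiff := hLmem v seq (hsub.subset hvs)
        rw [PySem.Dict.getD_eq_get?_getD, decInv_get? _ hLnd]
        rw [scoreA_erase wl seq d hmem hc1]
        by_cases hv : v ∈ inv.getD d []
        · have hds : d ∈ seq := hiff.mp hv
          have hcv : st.2.2.contains v = true := by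
            rw [hK v]
            exact decide_eq_true (List.mem_map_of_mem hvs)
          obtain ⟨s, hs⟩ : ∃ s, st.2.2.get? v = some s := by
            rw [PySem.Dict.contains_eq_isSome_get?] at hcv
            exact Option.isSome_iff_exists.mp hcv
          have hsv : s = pvScoreA wl seq := by
            have := hS v seq hvs
            rw [PySem.Dict.getD_eq_get?_getD, hs] at this
            simpa using this
          rw [if_pos hv, hs]
          simp [hsv, hds]
        · have hds : d ∉ seq := fun hd2 => hv (hiff.mpr hd2)
          rw [if_neg hv, ← PySem.Dict.getD_eq_get?_getD, hS v seq hvs]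
          simp [hds]
      · rw [if_neg h1]
        have hge : 2 ≤ wl.count d := by
          have h1' : wl.count d ≠ 1 := fun hh => h1 (hcount1iff.mpr hh)
          omega
        rw [hS v seq hvs]
        apply scoreA_ext
        intro e
        by_cases he : e = d
        · subst he
          constructor
          · intro _
            apply List.count_pos_iff.mp
            rw [List.count_erase_self]
            omega
          · intro _; exact hmem
        · exact (List.mem_erase_of_ne he).symm
      
lemma pvSInv_fold (wishlist : List String) (utts_dict : List (String × List String))
    (inv : PySem.Dict String (List String)) (Hinv : pvInvIdx utts_dict inv wishlist)
    (items' : List (String × List String)) (hsub : items'.Sublist utts_dict) :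
    ∀ (s : List String) (wl : List String)
      (st : PySem.Dict String Int × Int × PySem.Dict String Int),
      pvSInv wishlist wl items' st →
      pvSInv wishlist
        (s.foldl (fun wl diph => (PySem.List.remove? wl diph).getD wl) wl)
        items' (s.foldl (pvUpd inv) st) := by
  intro s
  induction s with
  | nil => intro wl st h; exact h
  | cons d s ih =>
    intro wl st h
    rw [List.foldl_cons, List.foldl_cons, remove?_getD_eq_erase]
    exact ih _ _ (pvUpd_step wishlist utts_dict inv Hinv items' hsub wl st d h)

-- membership in eraseIdx of a nodup list
lemma mem_eraseIdx_nodup {α : Type} (l : List α) (hl : l.Nodup) :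
    ∀ (k : Nat) (hk : k < l.length) (y : α), y ∈ l.eraseIdx k ↔ y ∈ l ∧ y ≠ l[k] := by
  induction l with
  | nil => intro k hk; simp at hk
  | cons x t ih =>
    rw [List.nodup_cons] at hl
    intro k hk y
    cases k with
    | zero =>
      simp only [List.eraseIdx_cons_zero, List.getElem_cons_zero, List.mem_cons]
      constructor
      · intro hy
        exact ⟨Or.inr hy, fun he => hl.1 (he ▸ hy)⟩
      · rintro ⟨hy | hy, hne⟩
        · exact absurd hy hne
        · exact hy
    | succ k =>
      have hk' : k < t.length := by simpa using hk
      simp only [List.eraseIdx_cons_succ, List.getElem_cons_succ, List.mem_cons]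
      rw [ih hl.2 k hk']
      constructor
      · rintro (hy | ⟨hy, hne⟩)
        · subst hy
          exact ⟨Or.inl rfl, fun he => hl.1 (he ▸ List.getElem_mem hk')⟩
        · exact ⟨Or.inr hy, hne⟩
      · rintro ⟨hy | hy, hne⟩
        · exact Or.inl hy
        · exact Or.inr ⟨hy, hne⟩

-- ---- assembly helpers for one round of the loop ----
lemma pv_map_eraseIdx {α β : Type} (f : α → β) :
    ∀ (l : List α) (k : Nat), (l.eraseIdx k).map f = (l.map f).eraseIdx k := by
  intro l
  induction l with
  | nil => intro k; simp
  | cons x t ih =>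
    intro k
    cases k with
    | zero => simp
    | succ k => simp [List.eraseIdx_cons_succ, ih]

lemma pvGo_head {α : Type} (f : α → Int) (x : α) (t : List α) :
    ∃ (k : Nat) (hk : k < (x :: t).length), pvGo f t 1 (0, x) = ((k : Int), (x :: t)[k]) := by
  rcases pvGo_spec f t 1 (0, x) with h | ⟨j, hj, h⟩
  · exact ⟨0, by simp, by simpa using h⟩
  · refine ⟨j + 1, by simpa using Nat.succ_lt_succ hj, ?_⟩
    rw [h]
    simp only [Prod.mk.injEq, List.getElem_cons_succ]
    exact ⟨by push_cast; ring, trivial⟩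

lemma rankA_head? (utts : PySem.Dict String (List String)) (wl' : List String)
    (x : String × List String) (t : List (String × List String))
    (hL : utts.items = x :: t)
    (hnd : (utts.items.map (fun p => p.1)).Nodup) :
    (rank_utts utts wl').head?
      = some ((((pvGo (fun p => pvScoreA wl' p.2) t 1 (0, x)).2).1,
               pvScoreA wl' ((pvGo (fun p => pvScoreA wl' p.2) t 1 (0, x)).2).2)) := by
  unfold rank_utts
  have hitems := PySem.Dict.items_foldl_insert_fresh utts.items (fun p => p.1)
      (fun p => pvScoreA wl' p.2) PySem.Dict.empty (fun a _ => by simp) hnd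
  simp only [] at hitems ⊢
  rw [hitems, head?_sorted_rev]
  simp only [PySem.Dict.items, PySem.Dict.empty, List.nil_append]
  rw [hL, List.map_cons, max?_cons_foldl]
  exact congrArg some
    (max?_fold_go (fun p => pvScoreA wl' p.2) (fun a => (a.1, pvScoreA wl' a.2))
      (fun y => y.2) (fun a => rfl) t 1 0 x)

-- B's argmax over the remaining utt names is the pvGo first-argmax over the item list
lemma pvArgmax_eq (wl' : List String) (score : PySem.Dict String Int)
    (x : String × List String) (t : List (String × List String))
    (hsc : ∀ v seq, (v, seq) ∈ x :: t → score.getD v 0 = pvScoreA wl' seq) :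
    pvArgmax score ((x :: t).map (fun p => p.1))
      = ((pvGo (fun p => pvScoreA wl' p.2) t 1 (0, x)).1,
          pvScoreA wl' ((pvGo (fun p => pvScoreA wl' p.2) t 1 (0, x)).2).2) := by
  unfold pvArgmax
  rw [enumerate_map, List.foldl_map]
  have hcongr : (PySem.List.enumerate (x :: t) 0).foldl
      (fun acc q => let s := score.getD ((fun q => (q.1, (fun p => p.1) q.2)) q).2 0;
        if s > acc.2 then (((fun q => (q.1, (fun p => p.1) q.2)) q).1, s) else acc) (-1, -1)
      = (PySem.List.enumerate (x :: t) 0).foldl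
      (fun acc q => if pvScoreA wl' q.2.2 > acc.2 then (q.1, pvScoreA wl' q.2.2) else acc) (-1, -1) := by
    apply PySem.List.foldl_congr_mem
    intro acc q hq
    have hq2 : q.2 ∈ x :: t := by
      have := PySem.List.map_snd_enumerate (x :: t) 0
      rw [← this]
      exact List.mem_map_of_mem hq
    rw [show score.getD q.2.1 0 = pvScoreA wl' q.2.2 from hsc q.2.1 q.2.2 hq2]
  rw [hcongr, PySem.List.enumerate_cons, List.foldl_cons]
  have hpos : pvScoreA wl' (((0 : Int), x)).2.2 > (((-1 : Int), (-1 : Int))).2 :=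
    lt_of_lt_of_le (by norm_num) (scoreA_nonneg wl' x.2)
  rw [if_pos hpos]
  have := pvBest_go (fun p => pvScoreA wl' p.2) t 1 (0, x)
  simpa using this

-- ---- the main loop lemma ----
lemma pvLoop_eq (wishlist : List String) (utts_dict : List (String × List String))
    (hnd : (utts_dict.map (fun p => p.1)).Nodup)
    (seqs inv : PySem.Dict String (List String)) (base : PySem.Dict String Int)
    (Hseqs : ∀ v seq, (v, seq) ∈ utts_dict → seqs.getD v [] = seq)
    (Hinv : pvInvIdx utts_dict inv wishlist)
    (Hbase : ∀ v seq, (v, seq) ∈ utts_dict → base.getD v 0 = pvScoreA wishlist seq) :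
    ∀ (fuel : Nat) (wl : List String) (uttsA : PySem.Dict String (List String))
      (st : PySem.Dict String Int × Int × PySem.Dict String Int) (sel : List String),
      uttsA.items.Sublist utts_dict →
      pvSInv wishlist wl uttsA.items st →
      fuel ≤ uttsA.size →
      pvLoopA (PySem.Set.ofList wishlist) fuel wl uttsA sel
        = pvLoopB seqs inv base (PySem.Set.ofList wishlist) fuel st.1 st.2.1 st.2.2
            (uttsA.items.map (fun p => p.1)) sel := by
  intro fuel
  induction fuel with
  | zero => intro wl uttsA st sel _ _ _; rfl
  | succ fuel ih =>
    intro wl uttsA st sel hsub hinv hsz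
    obtain ⟨hC, hT, hW, hK, hS⟩ := hinv
    have hndA : (uttsA.items.map (fun p => p.1)).Nodup :=
      (hsub.map (fun p => p.1)).nodup hnd
    have hz : (st.2.1 = 0) ↔ (wl.length = 0) := by
      rw [hT]; exact_mod_cast Iff.rfl
    simp only [pvLoopA, pvLoopB]
    -- name the post-refill states
    set wl' := if wl.length = 0 then PySem.Set.ofList wishlist else wl with hwl'
    set counts' := if st.2.1 = 0
      then (PySem.Set.ofList wishlist).foldl (fun d x => d.insert x 1) PySem.Dict.empty
      else st.1 with hcounts'
    set total' := if st.2.1 = 0 then ((PySem.Set.ofList wishlist).length : Int) else st.2.1 with htotal'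
    set score' := if st.2.1 = 0
      then (uttsA.items.map (fun p => p.1)).foldl
        (fun sc u => sc.insert u (base.getD u 0)) PySem.Dict.empty
      else st.2.2 with hscore'
    have hinv' : pvSInv wishlist wl' uttsA.items (counts', total', score') := by
      by_cases h0 : wl.length = 0
      · rw [hwl', hcounts', htotal', hscore', if_pos h0, if_pos (hz.mpr h0), if_pos (hz.mpr h0),
          if_pos (hz.mpr h0)]
        refine ⟨?_, rfl, ?_, ?_, ?_⟩
        · intro d
          rw [PySem.Dict.getD_eq_get?_getD, get?_foldl_insert (fun _ => (1 : Int))]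
          by_cases hd : d ∈ PySem.Set.ofList wishlist
          · rw [if_pos hd, List.count_eq_one_of_mem (PySem.Set.nodup_ofList wishlist) hd]
            rfl
          · rw [if_neg hd, List.count_eq_zero_of_not_mem hd]
            rfl
        · intro d hd
          exact (PySem.Set.mem_ofList wishlist d).mp hd
        · intro v
          rw [PySem.Dict.contains_eq_isSome_get?, get?_foldl_insert (fun u => base.getD u 0)]
          by_cases hv : v ∈ uttsA.items.map (fun p => p.1) <;> simp [hv]
        · intro v seq hvs
          rw [PySem.Dict.getD_eq_get?_getD, get?_foldl_insert (fun u => base.getD u 0),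
            if_pos (List.mem_map_of_mem hvs : v ∈ uttsA.items.map (fun p => p.1))]
          show base.getD v 0 = pvScoreA (PySem.Set.ofList wishlist) seq
          rw [Hbase v seq (hsub.subset hvs)]
          exact scoreA_ext _ _ _ (fun e => (PySem.Set.mem_ofList wishlist e).symm)
      · rw [hwl', hcounts', htotal', hscore', if_neg h0, if_neg (fun hh => h0 (hz.mp hh)),
          if_neg (fun hh => h0 (hz.mp hh)), if_neg (fun hh => h0 (hz.mp hh))]
        exact ⟨hC, hT, hW, hK, hS⟩
    obtain ⟨hC', hT', hW', hK', hS'⟩ := hinv'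
    have hlpos : 0 < uttsA.items.length := lt_of_lt_of_le (Nat.succ_pos fuel) hsz
    cases hL : uttsA.items with
    | nil => rw [hL] at hlpos; simp at hlpos
    | cons x t =>
      obtain ⟨k, hk, hgo⟩ := pvGo_head (fun p => pvScoreA wl' p.2) x t
      have hd := rankA_head? uttsA wl' x t hL hndA
      rw [hgo] at hd
      obtain ⟨rtl, hrtl⟩ : ∃ rtl, rank_utts uttsA wl'
          = ((x :: t)[k].1, pvScoreA wl' ((x :: t)[k]).2) :: rtl := by
        cases hr : rank_utts uttsA wl' with
        | nil => rw [hr] at hd; cases hd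
        | cons a b =>
          rw [hr] at hd
          simp only [List.head?_cons, Option.some.injEq] at hd
          exact ⟨b, by rw [hd]⟩
      have hscargs : ∀ v seq, (v, seq) ∈ x :: t → score'.getD v 0 = pvScoreA wl' seq := by
        intro v seq hvs
        exact hS' v seq (hL ▸ hvs)
      have hbest : pvArgmax score' ((x :: t).map (fun p => p.1))
          = ((k : Int), pvScoreA wl' ((x :: t)[k]).2) := by
        rw [pvArgmax_eq wl' score' x t hscargs, hgo]
      rw [hrtl, hbest]
      simp only []
      have hknn : ¬((k : Int) < 0) := not_lt.mpr (Int.natCast_nonneg k)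
      rw [if_neg hknn]
      have hklen : k < ((x :: t).map (fun p => p.1)).length := by
        simpa using hk
      have hpop := PySem.List.pop?_natCast ((x :: t).map (fun p => p.1)) k hklen
      rw [hpop]
      have hgetelt : ((x :: t).map (fun p => p.1))[k]'hklen = (x :: t)[k].1 := by
        simp only [List.getElem_map]
      -- the picked utt is (x :: t)[k].1
      have hmemi : ((x :: t)[k].1, (x :: t)[k].2) ∈ uttsA.items := by
        rw [hL]; simpa using List.getElem_mem hk
      have hkeysnd : uttsA.keys.Nodup := hndA
      have hgetD : uttsA.getD ((x :: t)[k].1) [] = ((x :: t)[k]).2 :=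
        PySem.Dict.getD_of_mem_items uttsA hmemi hkeysnd []
      have hseqdu : seqs.getD ((x :: t)[k].1) [] = ((x :: t)[k]).2 :=
        Hseqs ((x :: t)[k].1) ((x :: t)[k]).2 (hsub.subset hmemi)
      have herase : uttsA.erase ((x :: t)[k].1) = PySem.Dict.mk ((x :: t).eraseIdx k) := by
        show PySem.Dict.mk (uttsA.items.filter (fun p => !(p.1 == (x :: t)[k].1))) = _
        rw [hL]
        exact congrArg PySem.Dict.mk (filter_ne_eq_eraseIdx (x :: t) k hk (hL ▸ hndA))
      -- invariant after del score[u] on the shrunk item list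
      have hndxt : ((x :: t).map (fun p => p.1)).Nodup := hL ▸ hndA
      have hmm : ∀ v, v ∈ ((x :: t).map (fun p => p.1)).eraseIdx k ↔
          (v ∈ (x :: t).map (fun p => p.1) ∧ v ≠ (x :: t)[k].1) := by
        intro v
        have := mem_eraseIdx_nodup ((x :: t).map (fun p => p.1)) hndxt k (by simpa using hk) v
        rwa [List.getElem_map] at this
      have hinvdel : pvSInv wishlist wl' ((x :: t).eraseIdx k)
          (counts', total', score'.erase ((x :: t)[k].1)) := by
        refine ⟨hC', hT', hW', ?_, ?_⟩
        · intro v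
          rw [PySem.Dict.contains_eq_isSome_get?, dict_get?_erase, pv_map_eraseIdx]
          by_cases hv : v = (x :: t)[k].1
          · have hnmem : v ∉ ((x :: t).map (fun p => p.1)).eraseIdx k := by
              rw [hmm v]; exact fun hh => hh.2 hv
            rw [if_pos hv]
            exact (decide_eq_false hnmem).symm
          · rw [if_neg hv, ← PySem.Dict.contains_eq_isSome_get?, hK' v, hL]
            have hiff : v ∈ ((x :: t).map (fun p => p.1)).eraseIdx k ↔
                v ∈ (x :: t).map (fun p => p.1) := by
              rw [hmm v]
              exact ⟨fun hh => hh.1, fun hh => ⟨hh, hv⟩⟩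
            simp only [hiff]
        · intro v seq hvs
          have hvs' : (v, seq) ∈ x :: t := (List.eraseIdx_sublist _ k).subset hvs
          have hvmem : v ∈ ((x :: t).map (fun p => p.1)).eraseIdx k := by
            rw [← pv_map_eraseIdx]
            exact List.mem_map_of_mem hvs
          have hvne : v ≠ (x :: t)[k].1 := ((hmm v).mp hvmem).2
          rw [PySem.Dict.getD_eq_get?_getD, dict_get?_erase, if_neg hvne,
            ← PySem.Dict.getD_eq_get?_getD]
          exact hS' v seq (hL ▸ hvs')
      have hsub' : ((x :: t).eraseIdx k).Sublist utts_dict :=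
        ((List.eraseIdx_sublist (x :: t) k).trans (hL ▸ hsub))
      have hfold := pvSInv_fold wishlist utts_dict inv Hinv ((x :: t).eraseIdx k) hsub'
        ((x :: t)[k]).2 wl' (counts', total', score'.erase ((x :: t)[k].1)) hinvdel
      have hsz'' : fuel ≤ (PySem.Dict.mk ((x :: t).eraseIdx k)).size := by
        show fuel ≤ ((x :: t).eraseIdx k).length
        rw [List.length_eraseIdx_of_lt hk]
        have : fuel + 1 ≤ (x :: t).length := by rw [← hL]; exact hsz
        omega
      have hrec := ih
        (((x :: t)[k]).2.foldl (fun wl diph => (PySem.List.remove? wl diph).getD wl) wl')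
        (PySem.Dict.mk ((x :: t).eraseIdx k))
        (((x :: t)[k]).2.foldl (pvUpd inv) (counts', total', score'.erase ((x :: t)[k].1)))
        (sel ++ [(x :: t)[k].1])
        (by show ((x :: t).eraseIdx k).Sublist utts_dict; exact hsub')
        (by show pvSInv _ _ (PySem.Dict.mk ((x :: t).eraseIdx k)).items _; exact hfold)
        hsz''
      rw [hgetelt, hgetD]
      show pvLoopA (PySem.Set.ofList wishlist) fuel
          (((x :: t)[k]).2.foldl (fun wl diph => (PySem.List.remove? wl diph).getD wl) wl')
          (uttsA.erase ((x :: t)[k].1)) (sel ++ [(x :: t)[k].1])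
        = pvLoopB seqs inv base (PySem.Set.ofList wishlist) fuel
            ((seqs.getD ((x :: t)[k].1) []).foldl (pvUpd inv)
              (counts', total', score'.erase ((x :: t)[k].1))).1
            ((seqs.getD ((x :: t)[k].1) []).foldl (pvUpd inv)
              (counts', total', score'.erase ((x :: t)[k].1))).2.1
            ((seqs.getD ((x :: t)[k].1) []).foldl (pvUpd inv)
              (counts', total', score'.erase ((x :: t)[k].1))).2.2
            (((x :: t).map (fun p => p.1)).eraseIdx k) (sel ++ [(x :: t)[k].1])
      rw [hseqdu, herase, hrec, pv_map_eraseIdx]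

-- ---- top-level assembly: B's precomputed structures, named for the proof ----
def pvSeqs (u : List (String × List String)) : PySem.Dict String (List String) := PySem.Dict.mk u

def pvDist (u : List (String × List String)) : PySem.Dict String (List String) :=
  PySem.Dict.mk ((u.map (fun p => p.1)).map (fun v => (v, PySem.Set.ofList ((pvSeqs u).getD v []))))

def pvCounts0 (w : List String) : PySem.Dict String Int :=
  w.foldl (fun d x => d.insert x (d.getD x 0 + 1)) PySem.Dict.empty

def pvInv0 (w : List String) (u : List (String × List String)) : PySem.Dict String (List String) :=
  (u.map (fun p => p.1)).foldl
    (fun iv v => ((pvDist u).getD v []).foldl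
      (fun iv d => if (pvCounts0 w).contains d then iv.modify d [] (fun l => l ++ [v]) else iv) iv)
    PySem.Dict.empty

-- the nested inv-building loops compute, per key, the filter of the utt list
lemma inner_inv_getD (counts : PySem.Dict String Int) (v : String) :
    ∀ (distu : List String), distu.Nodup → ∀ (iv : PySem.Dict String (List String)) (c : String),
      (distu.foldl (fun iv d => if counts.contains d then iv.modify d [] (fun l => l ++ [v]) else iv) iv).getD c []
      = iv.getD c [] ++ (if c ∈ distu ∧ counts.contains c = true then [v] else []) := by
  intro distu
  induction distu with
  | nil => intro _ iv c; simp
  | cons d rest ih =>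
    intro hnd iv c
    rw [List.nodup_cons] at hnd
    rw [List.foldl_cons, ih hnd.2]
    by_cases hcd : counts.contains d = true
    · rw [if_pos hcd, PySem.Dict.getD_modify]
      by_cases hc : c = d
      · subst hc
        have hcr : c ∉ rest := hnd.1
        simp [hcr, hcd]
      · simp [hc]
    · rw [if_neg hcd]
      by_cases hc : c = d
      · subst hc; simp [hcd]
      · simp [hc]

lemma outer_inv_getD (counts : PySem.Dict String Int) (dist : PySem.Dict String (List String)) :
    ∀ (order : List String), (∀ v ∈ order, (dist.getD v [] : List String).Nodup) →
      ∀ (iv : PySem.Dict String (List String)) (c : String),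
      (order.foldl (fun iv v => (dist.getD v []).foldl
          (fun iv d => if counts.contains d then iv.modify d [] (fun l => l ++ [v]) else iv) iv) iv).getD c []
      = iv.getD c []
        ++ (if counts.contains c = true
            then order.filter (fun v => decide (c ∈ dist.getD v [])) else []) := by
  intro order
  induction order with
  | nil => intro _ iv c; simp
  | cons v rest ih =>
    intro hnd iv c
    rw [List.foldl_cons, ih (fun x hx => hnd x (List.mem_cons_of_mem v hx)),
      inner_inv_getD counts v (dist.getD v []) (hnd v List.mem_cons_self) iv c, List.append_assoc]
    congr 1
    by_cases hcc : counts.contains c = true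
    · rw [List.filter_cons]
      by_cases hm : c ∈ dist.getD v []
      · simp [hm, hcc]
      · simp [hm, hcc]
    · simp [hcc]

def pvBase0 (w : List String) (u : List (String × List String)) : PySem.Dict String Int :=
  (u.map (fun p => p.1)).foldl
    (fun b v => b.insert v (pvSumIn (pvCounts0 w) ((pvDist u).getD v []))) PySem.Dict.empty

lemma counts0_eq_counter (w : List String) : pvCounts0 w = PySem.Dict.counter w :=
  PySem.Dict.foldl_insert_getD_add_one_eq_counter w

lemma alt_eq_loopB (w : List String) (u : List (String × List String)) (L : Int) :
    select_utts_alt w u L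
      = pvLoopB (pvSeqs u) (pvInv0 w u) (pvBase0 w u) ((pvCounts0 w).keys) L.toNat
          (pvCounts0 w) (w.length : Int) (pvBase0 w u) (u.map (fun p => p.1)) [] := rfl

-- ===== VERDICT (by name: the statement is the Claim_ definition above) =====
theorem select_utts_spec : Claim_equal_select_utts := by
  intro w u L hdom hpre
  show select_utts w u L = select_utts_alt w u L
  have hnd : (u.map (fun p => p.1)).Nodup := hpre.1
  have hndkeys : (PySem.Dict.mk u).keys.Nodup := hnd
  have Hseqs : ∀ v seq, (v, seq) ∈ u → (pvSeqs u).getD v [] = seq := by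
    intro v seq h
    exact PySem.Dict.getD_of_mem_items (PySem.Dict.mk u) h hndkeys []
  have hdistnd : (pvDist u).keys.Nodup := by
    show (((u.map (fun p => p.1)).map (fun v => (v, PySem.Set.ofList ((pvSeqs u).getD v [])))).map
      (fun p => p.1)).Nodup
    rw [List.map_map]
    simpa using hnd
  have hdist : ∀ v seq, (v, seq) ∈ u → (pvDist u).getD v [] = PySem.Set.ofList seq := by
    intro v seq h
    have hv : v ∈ u.map (fun p => p.1) := List.mem_map_of_mem h
    have hpair : (v, PySem.Set.ofList ((pvSeqs u).getD v []))
        ∈ (u.map (fun p => p.1)).map (fun v => (v, PySem.Set.ofList ((pvSeqs u).getD v []))) :=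
      List.mem_map_of_mem hv
    have := PySem.Dict.getD_of_mem_items (pvDist u) hpair hdistnd []
    rwa [Hseqs v seq h] at this
  have hkeys0 : (pvCounts0 w).keys = PySem.Set.ofList w := by
    rw [counts0_eq_counter, PySem.Dict.keys_counter]
  have hcc : ∀ x, (pvCounts0 w).contains x = decide (x ∈ w) := by
    intro x
    rw [counts0_eq_counter, PySem.Dict.contains_counter]
    by_cases hx : x ∈ w <;> simp [hx]
  have Hbase : ∀ v seq, (v, seq) ∈ u → (pvBase0 w u).getD v 0 = pvScoreA w seq := by
    intro v seq h
    have hv : v ∈ u.map (fun p => p.1) := List.mem_map_of_mem h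
    show (pvBase0 w u).getD v 0 = pvScoreA w seq
    rw [PySem.Dict.getD_eq_get?_getD]
    unfold pvBase0
    rw [get?_foldl_insert (fun v => pvSumIn (pvCounts0 w) ((pvDist u).getD v [])), if_pos hv]
    show pvSumIn (pvCounts0 w) ((pvDist u).getD v []) = pvScoreA w seq
    rw [hdist v seq h]
    unfold pvSumIn pvScoreA
    apply PySem.List.foldl_congr_mem
    intro acc x _
    rw [hcc x]
    by_cases hx : x ∈ w <;> simp [hx]
  have Hinv : pvInvIdx u (pvInv0 w u) w := by
    intro d hd
    have hdp : d ∈ (pvCounts0 w).keys := by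
      rw [hkeys0]
      exact (PySem.Set.mem_ofList w d).mpr hd
    have hdistnds : ∀ v ∈ u.map (fun p => p.1), ((pvDist u).getD v [] : List String).Nodup := by
      intro v hv
      obtain ⟨p, hp, hpv⟩ := List.mem_map.mp hv
      subst hpv
      rw [hdist p.1 p.2 hp]
      exact PySem.Set.nodup_ofList p.2
    have hgd : (pvInv0 w u).getD d []
        = (u.map (fun p => p.1)).filter (fun v => decide (d ∈ (pvDist u).getD v [])) := by
      unfold pvInv0
      rw [outer_inv_getD (pvCounts0 w) (pvDist u) (u.map (fun p => p.1)) hdistnds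
        PySem.Dict.empty d]
      rw [hcc d, if_pos (decide_eq_true hd)]
      simp
    rw [hgd]
    constructor
    · exact hnd.filter _
    · intro v seq hvs
      rw [List.mem_filter]
      constructor
      · intro hh
        have := hh.2
        rw [hdist v seq hvs] at this
        simpa [PySem.Set.mem_ofList] using this
      · intro hh
        refine ⟨List.mem_map_of_mem hvs, ?_⟩
        rw [hdist v seq hvs]
        simpa [PySem.Set.mem_ofList] using hh
  have hsinv0 : pvSInv w w u ((pvCounts0 w), ((w.length : Int)), (pvBase0 w u)) := by
    refine ⟨?_, rfl, fun d hd => hd, ?_, ?_⟩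
    · intro d
      rw [counts0_eq_counter]
      exact PySem.Dict.getD_counter w d
    · intro v
      rw [PySem.Dict.contains_eq_isSome_get?]
      unfold pvBase0
      rw [get?_foldl_insert (fun v => pvSumIn (pvCounts0 w) ((pvDist u).getD v []))]
      by_cases hv : v ∈ u.map (fun p => p.1) <;> simp [hv]
    · intro v seq h
      exact Hbase v seq h
  have hsz : L.toNat ≤ (PySem.Dict.mk u).size := by
    show L.toNat ≤ u.length
    exact Int.toNat_le.mpr hpre.2
  have key := pvLoop_eq w u hnd (pvSeqs u) (pvInv0 w u) (pvBase0 w u) Hseqs Hinv Hbase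
    L.toNat w (PySem.Dict.mk u) ((pvCounts0 w), ((w.length : Int)), (pvBase0 w u)) []
    (List.Sublist.refl u) hsinv0 hsz
  rw [alt_eq_loopB, hkeys0]
  exact key
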